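-- pv_equiv track=rewrite | github.com/mailgyc/doudizhu | doudizhu/apps/game/rule.py | is_short_seq
-- ===== SOURCE A (Python) =====
-- from typing import Dict, List, Tuple, Iterable, Optional
--
-- def is_short_seq(hand_pokers: List[int]) -> bool:
--     if any(map(lambda p: p in hand_pokers,  [2, 15, 28, 41, 53, 54])):
--         return False
--     pokers = []
--     for poker in hand_pokers:
--         poker = poker % 13
--         if poker == 0 or poker == 1:
--             poker += 13
--         pokers.append(poker)
--     pokers.sort()
--     return sum(pokers) == (pokers[0] + pokers[-1]) * len(pokers) // 2
-- ===== SOURCE B (Python) =====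
-- # Single pass: running min/max/sum/count over the mapped values, no list build, no sort.
-- def is_short_seq(hand_pokers):
--     banned = frozenset((2, 15, 28, 41, 53, 54))
--     total = lo = hi = n = 0
--     for p in hand_pokers:
--         if p in banned:
--             return False
--         v = p % 13
--         if v < 2:
--             v += 13
--         if n == 0:
--             lo = hi = v
--         else:
--             if v < lo:
--                 lo = v
--             if v > hi:
--                 hi = v
--         total += v
--         n += 1
--     return n > 0 and total == (lo + hi) * n // 2
-- ===== Notes on version B (the rewrite author's own statement) =====
-- stated objective: faster
-- what changed: B makes one pass keeping running sum/min/max/count of the mapped values (bailing out at the first banned card), instead of A's separate banned scan, intermediate list build, sort and indexing.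
import Mathlib
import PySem

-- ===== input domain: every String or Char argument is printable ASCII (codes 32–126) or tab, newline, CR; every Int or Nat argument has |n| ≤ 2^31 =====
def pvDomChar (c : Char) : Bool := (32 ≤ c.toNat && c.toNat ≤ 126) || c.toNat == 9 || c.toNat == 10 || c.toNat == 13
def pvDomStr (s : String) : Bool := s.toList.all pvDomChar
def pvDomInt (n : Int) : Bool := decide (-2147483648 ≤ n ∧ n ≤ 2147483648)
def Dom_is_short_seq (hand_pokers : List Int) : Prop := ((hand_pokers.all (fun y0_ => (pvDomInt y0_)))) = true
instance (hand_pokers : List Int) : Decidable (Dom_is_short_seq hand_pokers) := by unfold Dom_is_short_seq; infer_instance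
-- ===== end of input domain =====

-- B replaces A's banned scan + map + sort + index with one pass keeping running sum/min/max/count (faster: no sort).
-- Pre_ excludes only the empty hand, on which A raises IndexError (pokers[0]).


-- ===== PORT A =====
def is_short_seq (hand_pokers : List Int) : Bool :=
  if ([2, 15, 28, 41, 53, 54] : List Int).any (fun p => hand_pokers.contains p) then
    false
  else
    let pokers : List Int := hand_pokers.foldl (fun acc poker =>
      let poker1 := PySem.Int.mod poker 13
      let poker2 := if poker1 == 0 || poker1 == 1 then poker1 + 13 else poker1
      acc ++ [poker2]) []
    let sorted := PySem.List.sorted pokers (fun x => x) false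
    match PySem.List.pyGet? sorted 0, PySem.List.pyGet? sorted (-1) with
    | some first, some last =>
        sorted.sum == PySem.Int.floordiv ((first + last) * (sorted.length : Int)) 2
    | _, _ => false  -- Python raises IndexError here (empty hand); excluded by Pre_

-- ===== PORT B =====
def pvBanned : List Int := [2, 15, 28, 41, 53, 54]

def pvMap (p : Int) : Int :=
  let v := PySem.Int.mod p 13
  if v < 2 then v + 13 else v

def pvAltLoop : List Int → Int → Int → Int → Int → Bool
  | [], total, lo, hi, n => decide (0 < n) && (total == PySem.Int.floordiv ((lo + hi) * n) 2)
  | p :: rest, total, lo, hi, n =>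
      if pvBanned.contains p then false
      else
        let v := pvMap p
        let lo' := if n == 0 then v else if v < lo then v else lo
        let hi' := if n == 0 then v else if hi < v then v else hi
        pvAltLoop rest (total + v) lo' hi' (n + 1)

def is_short_seq_alt (hand_pokers : List Int) : Bool :=
  pvAltLoop hand_pokers 0 0 0 0

-- ===== PRECONDITION & SPEC =====
-- Pre_ excludes exactly the empty hand: there A raises IndexError (indexing pokers[0] of an empty list).
def Pre_is_short_seq (hand_pokers : List Int) : Prop := hand_pokers ≠ []
instance (hand_pokers : List Int) : Decidable (Pre_is_short_seq hand_pokers) := by unfold Pre_is_short_seq; infer_instance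
def pvWitness_is_short_seq : List Int := [3, 4, 5]

def Spec_is_short_seq (hand_pokers : List Int) (out : Bool) : Prop := out = is_short_seq_alt hand_pokers
instance (hand_pokers : List Int) (out : Bool) : Decidable (Spec_is_short_seq hand_pokers out) := by unfold Spec_is_short_seq; infer_instance

-- ===== CLAIM (what is proved, stated in full; the proofs are below) =====
def Claim_equal_is_short_seq : Prop := ∀ (hand_pokers : List Int), Dom_is_short_seq hand_pokers → Pre_is_short_seq hand_pokers → Spec_is_short_seq hand_pokers (is_short_seq hand_pokers)

-- ===== LEMMAS AND PROOFS =====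

theorem pvAltLoop_banned (l : List Int) (h : ∃ p ∈ l, pvBanned.contains p = true) :
    ∀ total lo hi n, pvAltLoop l total lo hi n = false := by
  induction l with
  | nil => rcases h with ⟨p, hp, _⟩; simp at hp
  | cons q rest ih =>
    intro total lo hi n
    by_cases hq : pvBanned.contains q = true
    · simp only [pvAltLoop]; rw [if_pos hq]
    · rcases h with ⟨p, hp, hpb⟩
      rcases List.mem_cons.mp hp with rfl | hpr
      · exact absurd hpb hq
      · simp only [pvAltLoop, hq]
        exact ih ⟨p, hpr, hpb⟩ _ _ _ _

theorem pvAltLoop_clean (l : List Int) (h : ∀ p ∈ l, ¬ pvBanned.contains p = true)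
    (total lo hi n : Int) (hn : 0 < n) :
    pvAltLoop l total lo hi n =
      ((total + (l.map pvMap).sum) ==
        PySem.Int.floordiv
          (((l.map pvMap).foldl min lo + (l.map pvMap).foldl max hi) * (n + (l.length : Int))) 2) := by
  induction l generalizing total lo hi n with
  | nil => simp [pvAltLoop, hn]
  | cons p rest ih =>
    have hp : ¬ pvBanned.contains p = true := h p (by simp)
    have hn0 : (n == 0) = false := by simp; omega
    simp only [pvAltLoop, hp, if_neg, hn0, if_false, Bool.false_eq_true, not_false_eq_true]
    rw [ih (fun q hq => h q (by simp [hq])) _ _ _ _ (by omega)]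
    have hlo : (if pvMap p < lo then pvMap p else lo) = min lo (pvMap p) := by
      rcases min_cases lo (pvMap p) with ⟨h1, h2⟩ | ⟨h1, h2⟩ <;> rw [h1] <;> split_ifs <;> omega
    have hhi : (if hi < pvMap p then pvMap p else hi) = max hi (pvMap p) := by
      rcases max_cases hi (pvMap p) with ⟨h1, h2⟩ | ⟨h1, h2⟩ <;> rw [h1] <;> split_ifs <;> omega
    rw [hlo, hhi]
    simp only [List.map_cons, List.sum_cons, List.foldl_cons, List.length_cons]
    rw [show total + pvMap p + (rest.map pvMap).sum = total + (pvMap p + (rest.map pvMap).sum) from by ring,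
        show n + 1 + (rest.length : Int) = n + ((rest.length + 1 : Nat) : Int) from by push_cast; ring]


theorem pvMapA_eq :
    (fun poker : Int =>
      let poker1 := PySem.Int.mod poker 13
      let poker2 := if poker1 == 0 || poker1 == 1 then poker1 + 13 else poker1
      poker2) = pvMap := by
  funext poker
  have h0 : 0 ≤ PySem.Int.mod poker 13 := PySem.Int.mod_nonneg poker (by norm_num)
  simp only [pvMap, beq_iff_eq, Bool.or_eq_true]
  split_ifs <;> omega

theorem pv_sorted_stats (xs : List Int) (hne : xs ≠ []) :
    ∃ s0 sl, PySem.List.pyGet? (PySem.List.sorted xs (fun x => x) false) 0 = some s0 ∧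
      PySem.List.pyGet? (PySem.List.sorted xs (fun x => x) false) (-1) = some sl ∧
      (∀ y ∈ xs, s0 ≤ y) ∧ s0 ∈ xs ∧ (∀ y ∈ xs, y ≤ sl) ∧ sl ∈ xs ∧
      (PySem.List.sorted xs (fun x => x) false).sum = xs.sum ∧
      (PySem.List.sorted xs (fun x => x) false).length = xs.length := by
  set s := PySem.List.sorted xs (fun x => x) false with hs
  have hsne : s ≠ [] := by
    intro h; exact hne ((PySem.List.sorted_eq_nil_iff _ _ _).mp h)
  have hlen : s.length = xs.length := PySem.List.length_sorted _ _ _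
  have hpos : 0 < s.length := List.length_pos_of_ne_nil hsne
  refine ⟨s[0], s[s.length - 1], ?_, ?_, ?_, ?_, ?_, ?_, ?_, hlen⟩
  · simpa using PySem.List.pyGet?_ofNat s 0 hpos
  · rw [PySem.List.pyGet?_neg_one, List.getLast?_eq_getElem?]
    simp [List.getElem?_eq_getElem (by omega : s.length - 1 < s.length)]
  · intro y hy
    have hys : y ∈ s := (PySem.List.mem_sorted _ _ _ _).mpr hy
    obtain ⟨i, hi, rfl⟩ := List.getElem_of_mem hys
    exact PySem.List.sorted_id_getElem_mono _ (Nat.zero_le i) hi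
  · exact (PySem.List.mem_sorted _ _ _ _).mp (List.getElem_mem _)
  · intro y hy
    have hys : y ∈ s := (PySem.List.mem_sorted _ _ _ _).mpr hy
    obtain ⟨i, hi, rfl⟩ := List.getElem_of_mem hys
    exact PySem.List.sorted_id_getElem_mono _ (by omega : i ≤ s.length - 1) (by rw [← hs]; omega)
  · exact (PySem.List.mem_sorted _ _ _ _).mp (List.getElem_mem _)
  · exact (PySem.List.sorted_perm _ _ _).sum_eq

theorem is_short_seq_spec : Claim_equal_is_short_seq := by
  intro hand _ hpre
  unfold Spec_is_short_seq is_short_seq is_short_seq_alt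
  have hbeq : (([2, 15, 28, 41, 53, 54] : List Int).any (fun p => hand.contains p) = true)
      ↔ (∃ p ∈ hand, pvBanned.contains p = true) := by
    simp only [pvBanned, List.any_eq_true, List.contains_eq_mem, decide_eq_true_eq,
      List.mem_cons, List.not_mem_nil, or_false]
    constructor
    · rintro ⟨q, hq | hq | hq | hq | hq | hq, hmem⟩ <;> subst hq <;> exact ⟨_, hmem, by norm_num⟩
    · rintro ⟨q, hmem, hq⟩; exact ⟨q, by tauto, hmem⟩
  by_cases hban : ∃ p ∈ hand, pvBanned.contains p = true
  · rw [if_pos (hbeq.mpr hban), pvAltLoop_banned hand hban]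
  · rw [if_neg (fun h => hban (hbeq.mp h))]
    obtain ⟨p, rest, rfl⟩ := List.exists_cons_of_ne_nil hpre
    have hfold : (p :: rest).foldl (fun acc poker =>
        let poker1 := PySem.Int.mod poker 13
        let poker2 := if poker1 == 0 || poker1 == 1 then poker1 + 13 else poker1
        acc ++ [poker2]) ([] : List Int) = [] ++ (p :: rest).map pvMap := by
      rw [← pvMapA_eq]
      exact PySem.List.foldl_append_singleton_eq_map ..
    simp only [hfold, List.nil_append, List.map_cons]
    obtain ⟨s0, sl, hg0, hg1, hmin, hs0mem, hmax, hslmem, hsum, hlen⟩ :=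
      pv_sorted_stats (pvMap p :: rest.map pvMap) (by simp)
    rw [hg0, hg1]
    -- B side: one step of the loop, then the clean-loop characterisation
    have hpnb : ¬ pvBanned.contains p = true := fun h => hban ⟨p, by simp, h⟩
    have hrestnb : ∀ q ∈ rest, ¬ pvBanned.contains q = true :=
      fun q hq h => hban ⟨q, by simp [hq], h⟩
    simp only [pvAltLoop, hpnb, if_neg, Bool.false_eq_true, not_false_eq_true]
    norm_num only
    rw [pvAltLoop_clean rest hrestnb _ _ _ _ (by norm_num)]
    -- identify min / max / sum / length
    have hM : s0 = (rest.map pvMap).foldl min (pvMap p) := by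
      have h1 := PySem.List.foldl_min_le (rest.map pvMap) (pvMap p)
      have h2 := PySem.List.foldl_min_mem (rest.map pvMap) (pvMap p)
      refine le_antisymm ?_ ?_
      · rcases h2 with h | h
        · rw [h]; exact hmin _ (by simp)
        · exact hmin _ (by simp [h])
      · rcases List.mem_cons.mp hs0mem with rfl | h
        · exact h1.1
        · exact h1.2 _ h
    have hX : sl = (rest.map pvMap).foldl max (pvMap p) := by
      have h1 := PySem.List.le_foldl_max (rest.map pvMap) (pvMap p)
      have h2 := PySem.List.foldl_max_mem (rest.map pvMap) (pvMap p)
      refine le_antisymm ?_ ?_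
      · rcases List.mem_cons.mp hslmem with rfl | h
        · exact h1.1
        · exact h1.2 _ h
      · rcases h2 with h | h
        · rw [h]; exact hmax _ (by simp)
        · exact hmax _ (by simp [h])
    rw [hsum, hlen, hM, hX]
    simp only [List.sum_cons, List.length_cons, List.length_map]
    rw [show (0 : Int) + pvMap p + (rest.map pvMap).sum = pvMap p + (rest.map pvMap).sum from by ring,
        show (1 : Int) + (rest.length : Int) = ((rest.length + 1 : Nat) : Int) from by push_cast; ring]
    simp
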